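-- pv_equiv track=rewrite | github.com/thomshetland/graphTM-project | test.py | build_hex_adjacency
-- ===== SOURCE A (Python) =====
-- def build_hex_adjacency(board_size):
--     """Build undirected Hex adjacency on a board_size x board_size grid."""
--     edges = {}
--     for i in range(board_size):
--         for j in range(board_size):
--             node = (i, j)
--             edges[node] = []
--
--     def connect(a, b):
--         if b not in edges[a]:
--             edges[a].append(b)
--
--     for i in range(board_size):
--         for j in range(board_size):
--             node = (i, j)
--
--             if i < board_size - 1:
--                 connect(node, (i + 1, j))
--                 connect((i + 1, j), node)
--
--                 if j > 0:
--                     connect(node, (i + 1, j - 1))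
--                     connect((i + 1, j - 1), node)
--
--             if j < board_size - 1:
--                 connect(node, (i, j + 1))
--                 connect((i, j + 1), node)
--
--             if i > 0:
--                 connect(node, (i - 1, j))
--                 connect((i - 1, j), node)
--
--             if j > 0:
--                 connect(node, (i, j - 1))
--                 connect((i, j - 1), node)
--
--     return edges
-- ===== SOURCE B (Python) =====
-- def build_hex_adjacency(board_size):
--     """Build undirected Hex adjacency on a board_size x board_size grid."""
--     offsets = [(-1, 0), (-1, 1), (0, -1), (1, 0), (1, -1), (0, 1)]
--     edges = {}
--     for i in range(board_size):
--         for j in range(board_size):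
--             edges[(i, j)] = [(i + di, j + dj) for di, dj in offsets
--                              if 0 <= i + di < board_size and 0 <= j + dj < board_size]
--     return edges
-- ===== Notes on version B (the rewrite author's own statement) =====
-- stated objective: simpler
-- what changed: Replaces the two-pass build (init dict, then a connect() helper adding each undirected edge twice with a 'not in' dedup scan) by a single pass that writes each cell's neighbor list directly from a fixed ordered offset table, producing every neighbor exactly once in the same order.
import Mathlib
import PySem

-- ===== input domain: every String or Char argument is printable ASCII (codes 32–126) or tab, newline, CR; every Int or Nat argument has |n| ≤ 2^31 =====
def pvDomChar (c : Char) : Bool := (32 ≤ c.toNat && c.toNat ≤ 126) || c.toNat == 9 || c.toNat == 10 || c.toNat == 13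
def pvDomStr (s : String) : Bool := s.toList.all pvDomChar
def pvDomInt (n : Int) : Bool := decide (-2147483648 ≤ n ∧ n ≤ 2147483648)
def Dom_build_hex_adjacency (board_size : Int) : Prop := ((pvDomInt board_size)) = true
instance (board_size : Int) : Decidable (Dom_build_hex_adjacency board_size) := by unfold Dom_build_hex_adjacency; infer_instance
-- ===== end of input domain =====

-- B builds each cell's neighbor list directly from a fixed ordered offset table in one pass,
-- instead of A's init pass plus a connect() helper adding both directions with a 'not in' dedup scan.

-- ===== PORT A =====
-- connect(a, b): if b not in edges[a]: edges[a].append(b)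
-- (edges[a] is read with default [] here; in A every call has a already a key, so this is exact)
def pvConnect (d : PySem.Dict (Int × Int) (List (Int × Int))) (a b : Int × Int) :
    PySem.Dict (Int × Int) (List (Int × Int)) :=
  if b ∈ d.getD a [] then d else d.modify a [] (fun l => l ++ [b])

-- the body of A's second nested loop, at node (i, j)
def pvBodyA (n : Int) (d : PySem.Dict (Int × Int) (List (Int × Int))) (i j : Int) :
    PySem.Dict (Int × Int) (List (Int × Int)) :=
  let d := if i < n - 1 then
      let d := pvConnect d (i, j) (i + 1, j)
      let d := pvConnect d (i + 1, j) (i, j)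
      if 0 < j then
        let d := pvConnect d (i, j) (i + 1, j - 1)
        pvConnect d (i + 1, j - 1) (i, j)
      else d
    else d
  let d := if j < n - 1 then
      let d := pvConnect d (i, j) (i, j + 1)
      pvConnect d (i, j + 1) (i, j)
    else d
  let d := if 0 < i then
      let d := pvConnect d (i, j) (i - 1, j)
      pvConnect d (i - 1, j) (i, j)
    else d
  if 0 < j then
      let d := pvConnect d (i, j) (i, j - 1)
      pvConnect d (i, j - 1) (i, j)
  else d

def build_hex_adjacency (board_size : Int) : List (Int × Int × List (Int × Int)) :=
  let init := (PySem.List.pyRange 0 board_size 1).foldl (fun d i =>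
      (PySem.List.pyRange 0 board_size 1).foldl (fun d j => d.insert (i, j) []) d)
    PySem.Dict.empty
  let final := (PySem.List.pyRange 0 board_size 1).foldl (fun d i =>
      (PySem.List.pyRange 0 board_size 1).foldl (fun d j => pvBodyA board_size d i j) d) init
  final.items.map (fun p => (p.1.1, p.1.2, p.2))

-- ===== PORT B =====
def pvOffsets : List (Int × Int) := [(-1, 0), (-1, 1), (0, -1), (1, 0), (1, -1), (0, 1)]

-- [(i+di, j+dj) for di, dj in offsets if 0 <= i+di < n and 0 <= j+dj < n]
def pvNbrs (n i j : Int) : List (Int × Int) :=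
  (pvOffsets.filter (fun o =>
      decide (0 ≤ i + o.1 ∧ i + o.1 < n ∧ 0 ≤ j + o.2 ∧ j + o.2 < n))).map
    (fun o => (i + o.1, j + o.2))

def build_hex_adjacency_alt (board_size : Int) : List (Int × Int × List (Int × Int)) :=
  (((PySem.List.pyRange 0 board_size 1).foldl (fun d i =>
      (PySem.List.pyRange 0 board_size 1).foldl (fun d j =>
        d.insert (i, j) (pvNbrs board_size i j)) d)
    (PySem.Dict.empty (κ := Int × Int) (ν := List (Int × Int)))).items).map
    (fun p => (p.1.1, p.1.2, p.2))

-- ===== PRECONDITION & SPEC =====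
def Spec_build_hex_adjacency (board_size : Int) (out : List (Int × Int × List (Int × Int))) : Prop := out = build_hex_adjacency_alt board_size
instance (board_size : Int) (out : List (Int × Int × List (Int × Int))) : Decidable (Spec_build_hex_adjacency board_size out) := by unfold Spec_build_hex_adjacency; infer_instance

-- ===== CLAIM (what is proved, stated in full; the proofs are below) =====
def Claim_equal_build_hex_adjacency : Prop := ∀ (board_size : Int), Dom_build_hex_adjacency board_size → Spec_build_hex_adjacency board_size (build_hex_adjacency board_size)

-- ===== LEMMAS AND PROOFS =====

def pvGrid (n : Int) : List (Int × Int) :=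
  (PySem.List.pyRange 0 n 1).flatMap (fun i => (PySem.List.pyRange 0 n 1).map (fun j => (i, j)))

theorem pv_foldl_flatMap {α β γ : Type} (l : List α) (g : α → List β) (f : γ → β → γ) (init : γ) :
    (l.flatMap g).foldl f init = l.foldl (fun a x => (g x).foldl f a) init := by
  induction l generalizing init with
  | nil => rfl
  | cons h t ih => simp [List.flatMap_cons, List.foldl_append, ih]

theorem pv_mem_grid (n : Int) (p : Int × Int) :
    p ∈ pvGrid n ↔ 0 ≤ p.1 ∧ p.1 < n ∧ 0 ≤ p.2 ∧ p.2 < n := by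
  obtain ⟨i, j⟩ := p
  simp only [pvGrid, List.mem_flatMap, List.mem_map, PySem.List.mem_pyRange_one]
  constructor
  · rintro ⟨a, ha, j', hj', h⟩
    obtain ⟨rfl, rfl⟩ := Prod.mk.injEq .. ▸ h
    exact ⟨ha.1, ha.2, hj'.1, hj'.2⟩
  · rintro ⟨h1, h2, h3, h4⟩
    exact ⟨i, ⟨h1, h2⟩, j, ⟨h3, h4⟩, rfl⟩

theorem pv_pyRange_pairwise' (n : Int) : (PySem.List.pyRange 0 n 1).Pairwise (· < ·) := by
  rcases lt_or_ge n 0 with h | h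
  · have : PySem.List.pyRange 0 n 1 = [] := by
      rw [List.eq_nil_iff_forall_not_mem]
      intro x hx; rw [PySem.List.mem_pyRange_one] at hx; omega
    rw [this]; exact List.Pairwise.nil
  · rw [← Int.toNat_of_nonneg h, PySem.List.pyRange_zero_natCast]
    exact (List.pairwise_lt_range).map _ (fun a b hab => by exact_mod_cast hab)

def pvLex (a b : Int × Int) : Prop := a.1 < b.1 ∨ (a.1 = b.1 ∧ a.2 < b.2)

theorem pv_grid_pairwise (n : Int) : (pvGrid n).Pairwise pvLex := by
  rw [pvGrid, List.flatMap]
  rw [List.pairwise_flatten]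
  refine ⟨?_, ?_⟩
  · intro l hl
    simp only [List.mem_map] at hl
    obtain ⟨i, _, rfl⟩ := hl
    exact (pv_pyRange_pairwise' n).map _ (fun a b hab => Or.inr ⟨rfl, hab⟩)
  · have := (pv_pyRange_pairwise' n).map
      (f := fun i => (PySem.List.pyRange 0 n 1).map (fun j => ((i : Int), j)))
      (S := fun l1 l2 => ∀ x ∈ l1, ∀ y ∈ l2, pvLex x y) ?_
    · exact this
    · intro a b hab
      intro x hx y hy
      simp only [List.mem_map] at hx hy
      obtain ⟨j1, _, rfl⟩ := hx; obtain ⟨j2, _, rfl⟩ := hy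
      exact Or.inl hab

theorem pv_grid_nodup (n : Int) : (pvGrid n).Nodup := by
  exact (pv_grid_pairwise n).imp (fun {a b} hab => by
    rcases hab with h | ⟨h1, h2⟩
    · exact fun he => by rw [he] at h; omega
    · exact fun he => by rw [he] at h2; omega)

theorem pv_connect_keys (d : PySem.Dict (Int × Int) (List (Int × Int))) (a b : Int × Int)
    (h : d.contains a = true) : (pvConnect d a b).keys = d.keys := by
  unfold pvConnect
  split_ifs with hb
  · rfl
  · rw [PySem.Dict.keys_modify, PySem.Dict.keys_insert_of_contains _ _ h]

theorem pv_connect_getD (d : PySem.Dict (Int × Int) (List (Int × Int))) (a b q : Int × Int) :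
    (pvConnect d a b).getD q [] =
      if a = q then PySem.Set.add (d.getD q []) b else d.getD q [] := by
  unfold pvConnect PySem.Set.add
  have hc : ∀ s : List (Int × Int), PySem.Set.contains s b = decide (b ∈ s) := by
    intro s; simp [PySem.Set.contains]
  by_cases hb : b ∈ d.getD a []
  · rw [if_pos hb]
    by_cases ha : a = q
    · subst ha; rw [if_pos rfl, hc, decide_eq_true hb]; simp
    · rw [if_neg ha]
  · rw [if_neg hb, PySem.Dict.getD_modify]
    by_cases ha : a = q
    · subst ha
      rw [if_pos rfl, if_pos rfl, hc, decide_eq_false hb]; simp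
    · rw [if_neg ha, if_neg (fun h => ha h.symm)]

theorem pv_conn_foldl (ops : List ((Int × Int) × (Int × Int)))
    (d : PySem.Dict (Int × Int) (List (Int × Int)))
    (h : ∀ p ∈ ops, d.contains p.1 = true) :
    ((ops.foldl (fun d p => pvConnect d p.1 p.2) d).keys = d.keys) ∧
    (∀ q, (ops.foldl (fun d p => pvConnect d p.1 p.2) d).getD q [] =
      ((ops.filter (fun p => p.1 == q)).map (fun p => p.2)).foldl PySem.Set.add (d.getD q [])) := by
  induction ops generalizing d with
  | nil => exact ⟨rfl, fun q => rfl⟩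
  | cons p t ih =>
    have hp := h p (List.mem_cons_self ..)
    have hk : (pvConnect d p.1 p.2).keys = d.keys := pv_connect_keys _ _ _ hp
    have hcont : ∀ x, (pvConnect d p.1 p.2).contains x = d.contains x := by
      intro x
      have h1 := PySem.Dict.contains_iff_mem_keys (pvConnect d p.1 p.2) x
      have h2 := PySem.Dict.contains_iff_mem_keys d x
      rw [hk] at h1
      cases hx : d.contains x
      · cases hy : (pvConnect d p.1 p.2).contains x
        · rfl
        · exact absurd (h2.mpr (h1.mp hy)) (by simp [hx])
      · exact h1.mpr (h2.mp hx)
    have ht : ∀ p' ∈ t, (pvConnect d p.1 p.2).contains p'.1 = true := by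
      intro p' hp'; rw [hcont]; exact h p' (List.mem_cons_of_mem _ hp')
    obtain ⟨ihk, ihg⟩ := ih (pvConnect d p.1 p.2) ht
    refine ⟨by rw [List.foldl_cons, ihk, hk], ?_⟩
    intro q
    rw [List.foldl_cons, ihg q, pv_connect_getD, List.filter_cons]
    by_cases hq : p.1 = q
    · rw [if_pos hq, if_pos (by simp [hq])]
      simp
    · rw [if_neg hq, if_neg (by simp [hq])]

def pvOpsAt (n i j : Int) : List ((Int × Int) × (Int × Int)) :=
  (if i < n - 1 then
      [((i,j),(i+1,j)), ((i+1,j),(i,j))] ++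
      (if 0 < j then [((i,j),(i+1,j-1)), ((i+1,j-1),(i,j))] else [])
    else []) ++
  (if j < n - 1 then [((i,j),(i,j+1)), ((i,j+1),(i,j))] else []) ++
  (if 0 < i then [((i,j),(i-1,j)), ((i-1,j),(i,j))] else []) ++
  (if 0 < j then [((i,j),(i,j-1)), ((i,j-1),(i,j))] else [])

def pvTouch (n i j x y : Int) : List (Int × Int) :=
  ((pvOpsAt n i j).filter (fun p => p.1 == (x, y))).map (fun p => p.2)

theorem pv_bodyA_eq (n : Int) (d : PySem.Dict (Int × Int) (List (Int × Int))) (i j : Int) :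
    pvBodyA n d i j = (pvOpsAt n i j).foldl (fun d p => pvConnect d p.1 p.2) d := by
  unfold pvBodyA pvOpsAt
  split_ifs <;> simp [List.foldl_append]

theorem pv_touch_self (n x y : Int) :
    pvTouch n x y x y =
      (if x < n - 1 then [(x+1,y)] ++ (if 0 < y then [(x+1,y-1)] else []) else []) ++
      (if y < n - 1 then [(x,y+1)] else []) ++
      (if 0 < x then [(x-1,y)] else []) ++
      (if 0 < y then [(x,y-1)] else []) := by
  unfold pvTouch pvOpsAt
  split_ifs <;> simp_all [List.filter_cons, Prod.ext_iff] <;> omega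

set_option maxHeartbeats 1000000 in

theorem pv_touch_row_ne (n i j x y : Int) (h1 : i ≠ x - 1) (h2 : i ≠ x) (h3 : i ≠ x + 1) :
    pvTouch n i j x y = [] := by
  unfold pvTouch
  rw [List.map_eq_nil_iff, List.filter_eq_nil_iff]
  intro p hp
  simp only [pvOpsAt, List.mem_append, List.mem_ite_nil_right, List.mem_cons,
    List.not_mem_nil, or_false] at hp
  simp only [beq_iff_eq]
  rcases hp with ((⟨_, ((h|h)|⟨_, (h|h)⟩)⟩ | ⟨_, (h|h)⟩) | ⟨_, (h|h)⟩) | ⟨_, (h|h)⟩ <;>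
    (rw [h]; simp [Prod.ext_iff]; omega)

set_option maxHeartbeats 1000000 in

theorem pv_touch_col_ne (n i j x y : Int) (h1 : j ≠ y - 1) (h2 : j ≠ y) (h3 : j ≠ y + 1) :
    pvTouch n i j x y = [] := by
  unfold pvTouch
  rw [List.map_eq_nil_iff, List.filter_eq_nil_iff]
  intro p hp
  simp only [pvOpsAt, List.mem_append, List.mem_ite_nil_right, List.mem_cons,
    List.not_mem_nil, or_false] at hp
  simp only [beq_iff_eq]
  rcases hp with ((⟨_, ((h|h)|⟨_, (h|h)⟩)⟩ | ⟨_, (h|h)⟩) | ⟨_, (h|h)⟩) | ⟨_, (h|h)⟩ <;>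
    (rw [h]; simp [Prod.ext_iff]; omega)

theorem pv_touch_t1 (n x y : Int) (hx : x < n) : pvTouch n (x-1) y x y = [(x-1,y)] := by
  unfold pvTouch pvOpsAt
  split_ifs <;> simp_all [Prod.ext_iff] <;> omega

theorem pv_touch_t2 (n x y : Int) (hx : x < n) (hy : 0 ≤ y) :
    pvTouch n (x-1) (y+1) x y = [(x-1,y+1)] := by
  unfold pvTouch pvOpsAt
  split_ifs <;> simp_all [Prod.ext_iff] <;> omega

theorem pv_touch_t3 (n x y : Int) : pvTouch n (x-1) (y-1) x y = [] := by
  unfold pvTouch pvOpsAt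
  split_ifs <;> simp_all [Prod.ext_iff] <;> omega

theorem pv_touch_t4 (n x y : Int) (hy : y < n) : pvTouch n x (y-1) x y = [(x,y-1)] := by
  unfold pvTouch pvOpsAt
  split_ifs <;> simp_all [Prod.ext_iff] <;> omega

theorem pv_touch_t6 (n x y : Int) (hy : 0 ≤ y) : pvTouch n x (y+1) x y = [(x,y+1)] := by
  unfold pvTouch pvOpsAt
  split_ifs <;>
    simp_all [Prod.ext_iff, show y+1+1 ≠ y from by omega, show ¬(y+1+1 = y) from by omega]

theorem pv_touch_t7 (n x y : Int) (hx : 0 ≤ x) : pvTouch n (x+1) y x y = [(x+1,y)] := by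
  unfold pvTouch pvOpsAt
  split_ifs <;>
    simp_all [Prod.ext_iff, show ¬(x+1+1 = x) from by omega]

theorem pv_touch_t8 (n x y : Int) : pvTouch n (x+1) (y-1) x y = [] := by
  unfold pvTouch pvOpsAt
  split_ifs <;> simp_all [Prod.ext_iff] <;> omega

theorem pv_touch_t9 (n x y : Int) : pvTouch n (x+1) (y+1) x y = [] := by
  unfold pvTouch pvOpsAt
  split_ifs <;> simp_all [Prod.ext_iff] <;> omega

theorem pv_flatMap_support3 {β : Type} (l : List Int) (hl : l.Pairwise (· < ·)) (g : Int → List β)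
    (a b c : Int) (hab : a < b) (hbc : b < c)
    (h0 : ∀ i ∈ l, i ≠ a → i ≠ b → i ≠ c → g i = []) :
    l.flatMap g = (if a ∈ l then g a else []) ++ (if b ∈ l then g b else []) ++
      (if c ∈ l then g c else []) := by
  induction l with
  | nil => simp
  | cons h t ih =>
    rw [List.pairwise_cons] at hl
    obtain ⟨hlt, htp⟩ := hl
    have ih' := ih htp (fun i hi => h0 i (List.mem_cons_of_mem _ hi))
    rw [List.flatMap_cons, ih']
    by_cases ha : h = a
    · subst ha
      have h1 : h ∉ t := fun hm => absurd (hlt h hm) (lt_irrefl h)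
      simp [List.mem_cons, h1, show ¬(b = h) from by omega, show ¬(c = h) from by omega]
    · by_cases hb : h = b
      · subst hb
        have h1 : a ∉ t := fun hm => absurd (hlt a hm) (by omega)
        have h2 : h ∉ t := fun hm => absurd (hlt h hm) (lt_irrefl h)
        simp [List.mem_cons, h1, h2, show ¬(a = h) from by omega, show ¬(c = h) from by omega,
          Ne.symm ha]
      · by_cases hc : h = c
        · subst hc
          have h1 : a ∉ t := fun hm => absurd (hlt a hm) (by omega)
          have h2 : b ∉ t := fun hm => absurd (hlt b hm) (by omega)
          have h3 : h ∉ t := fun hm => absurd (hlt h hm) (lt_irrefl h)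
          simp [List.mem_cons, h1, h2, h3, show ¬(a = h) from by omega,
            show ¬(b = h) from by omega, Ne.symm ha, Ne.symm hb]
        · rw [h0 h (List.mem_cons_self ..) ha hb hc]
          simp [List.mem_cons, Ne.symm ha, Ne.symm hb, Ne.symm hc]

theorem pv_flatMap_support3_range {β : Type} (n : Int) (g : Int → List β)
    (a b c : Int) (hab : a < b) (hbc : b < c)
    (h0 : ∀ i, 0 ≤ i → i < n → i ≠ a → i ≠ b → i ≠ c → g i = []) :
    (PySem.List.pyRange 0 n 1).flatMap g =
      (if 0 ≤ a ∧ a < n then g a else []) ++ (if 0 ≤ b ∧ b < n then g b else []) ++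
      (if 0 ≤ c ∧ c < n then g c else []) := by
  rw [pv_flatMap_support3 _ (pv_pyRange_pairwise' n) g a b c hab hbc
    (fun i hi => h0 i (PySem.List.mem_pyRange_one.mp hi).1 (PySem.List.mem_pyRange_one.mp hi).2)]
  simp [PySem.List.mem_pyRange_one]

theorem pv_set_foldl_add_fresh {α : Type} [BEq α] [LawfulBEq α] (l : List α) :
    ∀ (s : PySem.Set α), (∀ z ∈ l, z ∉ s) → l.Nodup →
      List.foldl PySem.Set.add s l = s ++ l := by
  induction l with
  | nil => intro s _ _; simp
  | cons a t ih =>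
    intro s hd hn
    rw [List.foldl_cons]
    have hm : a ∉ s := hd a (List.mem_cons_self ..)
    have hadd : PySem.Set.add s a = s ++ [a] := by
      simp [PySem.Set.add, PySem.Set.contains, hm]
    rw [hadd, ih (s ++ [a]) ?_ (List.Nodup.of_cons hn), List.append_assoc]
    · rfl
    · intro z hz hmem
      rcases List.mem_append.mp hmem with hzs | hza
      · exact hd z (List.mem_cons_of_mem _ hz) hzs
      · rcases List.mem_singleton.mp hza with rfl
        exact (List.nodup_cons.mp hn).1 hz

theorem pv_set_ofList_nodup {α : Type} [BEq α] [LawfulBEq α] (l : List α) (h : l.Nodup) :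
    PySem.Set.ofList l = l := by
  rw [PySem.Set.ofList_eq_foldl]
  simpa using pv_set_foldl_add_fresh l [] (by simp) h

theorem pv_set_update_subset {α : Type} [BEq α] [LawfulBEq α] (s : PySem.Set α) (l : List α)
    (h : ∀ z ∈ l, z ∈ s) : List.foldl PySem.Set.add s l = s := by
  induction l with
  | nil => rfl
  | cons a t ih =>
    rw [List.foldl_cons]
    have : PySem.Set.add s a = s := by
      have hm : a ∈ s := h a (List.mem_cons_self ..)
      simp [PySem.Set.add, PySem.Set.contains, hm]
    rw [this]
    exact ih (fun z hz => h z (List.mem_cons_of_mem _ hz))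

theorem pv_set_fold (F D : List (Int × Int)) (hF : F.Nodup) (hD : ∀ z ∈ D, z ∈ F) :
    List.foldl PySem.Set.add [] (F ++ D) = F := by
  rw [List.foldl_append]
  have h1 : List.foldl PySem.Set.add [] F = F := by
    rw [← PySem.Set.ofList_eq_foldl]; exact pv_set_ofList_nodup F hF
  rw [h1]
  exact pv_set_update_subset F D hD


def pvRowTouch (n x y i : Int) : List (Int × Int) :=
  (PySem.List.pyRange 0 n 1).flatMap (fun j => pvTouch n i j x y)

theorem pv_rowTouch_far (n x y i : Int) (h1 : i ≠ x - 1) (h2 : i ≠ x) (h3 : i ≠ x + 1) :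
    pvRowTouch n x y i = [] := by
  rw [pvRowTouch, List.flatMap_eq_nil_iff]
  exact fun j _ => pv_touch_row_ne n i j x y h1 h2 h3

theorem pv_rowTouch_xm1 (n x y : Int) (hxn : x < n) (hy : 0 ≤ y) (hyn : y < n) :
    pvRowTouch n x y (x-1) = [(x-1,y)] ++ (if y + 1 < n then [(x-1,y+1)] else []) := by
  rw [pvRowTouch, pv_flatMap_support3_range n _ (y-1) y (y+1) (by omega) (by omega)
    (fun j _ _ hj1 hj2 hj3 => pv_touch_col_ne n (x-1) j x y hj1 hj2 hj3)]
  rw [pv_touch_t3, pv_touch_t1 n x y hxn, pv_touch_t2 n x y hxn hy]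
  simp [show (0 ≤ y ∧ y < n) from ⟨hy, hyn⟩,
    show (0 ≤ y+1 ∧ y+1 < n) ↔ y+1 < n from by omega]

theorem pv_rowTouch_x (n x y : Int) (hx : 0 ≤ x) (hxn : x < n) (hy : 0 ≤ y) (hyn : y < n) :
    pvRowTouch n x y x =
      (if 1 ≤ y then [(x,y-1)] else []) ++
      ((if x+1 < n then [(x+1,y)] ++ (if 1 ≤ y then [(x+1,y-1)] else []) else []) ++
       (if y+1 < n then [(x,y+1)] else []) ++ (if 1 ≤ x then [(x-1,y)] else []) ++
       (if 1 ≤ y then [(x,y-1)] else [])) ++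
      (if y + 1 < n then [(x,y+1)] else []) := by
  rw [pvRowTouch, pv_flatMap_support3_range n _ (y-1) y (y+1) (by omega) (by omega)
    (fun j _ _ hj1 hj2 hj3 => pv_touch_col_ne n x j x y hj1 hj2 hj3)]
  rw [pv_touch_t4 n x y hyn, pv_touch_self, pv_touch_t6 n x y hy]
  simp [show (0 ≤ y ∧ y < n) from ⟨hy, hyn⟩,
    show (0 ≤ y-1 ∧ y-1 < n) ↔ 1 ≤ y from by omega,
    show (0 ≤ y+1 ∧ y+1 < n) ↔ y+1 < n from by omega,
    show (0 < y) ↔ 1 ≤ y from by omega,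
    show (x < n-1) ↔ x+1 < n from by omega,
    show (y < n-1) ↔ y+1 < n from by omega,
    show (0 < x) ↔ 1 ≤ x from by omega]
  simp [show (1 ≤ y ∧ y ≤ n) ↔ 1 ≤ y from by omega]

theorem pv_rowTouch_xp1 (n x y : Int) (hx : 0 ≤ x) (hy : 0 ≤ y) (hyn : y < n) :
    pvRowTouch n x y (x+1) = [(x+1,y)] := by
  rw [pvRowTouch, pv_flatMap_support3_range n _ (y-1) y (y+1) (by omega) (by omega)
    (fun j _ _ hj1 hj2 hj3 => pv_touch_col_ne n (x+1) j x y hj1 hj2 hj3)]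
  rw [pv_touch_t8, pv_touch_t9, pv_touch_t7 n x y hx]
  simp [show (0 ≤ y ∧ y < n) from ⟨hy, hyn⟩]

def pvF (n x y : Int) : List (Int × Int) :=
  (if 1 ≤ x then [(x-1,y)] else []) ++ (if 1 ≤ x ∧ y+1 < n then [(x-1,y+1)] else []) ++
  (if 1 ≤ y then [(x,y-1)] else []) ++ (if x+1 < n then [(x+1,y)] else []) ++
  (if x+1 < n ∧ 1 ≤ y then [(x+1,y-1)] else []) ++ (if y+1 < n then [(x,y+1)] else [])

def pvD (n x y : Int) : List (Int × Int) :=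
  (if 1 ≤ x then [(x-1,y)] else []) ++ (if 1 ≤ y then [(x,y-1)] else []) ++
  (if y+1 < n then [(x,y+1)] else []) ++ (if x+1 < n then [(x+1,y)] else [])

set_option maxHeartbeats 2000000 in
theorem pv_bigTouch (n x y : Int) (hx : 0 ≤ x) (hxn : x < n) (hy : 0 ≤ y) (hyn : y < n) :
    (pvGrid n).flatMap (fun c => pvTouch n c.1 c.2 x y) = pvF n x y ++ pvD n x y := by
  have hgrid : (pvGrid n).flatMap (fun c => pvTouch n c.1 c.2 x y)
      = (PySem.List.pyRange 0 n 1).flatMap (fun i => pvRowTouch n x y i) := by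
    rw [pvGrid, List.flatMap_assoc]
    simp only [List.flatMap_map]
    rfl
  rw [hgrid, pv_flatMap_support3_range n _ (x-1) x (x+1) (by omega) (by omega)
    (fun i _ _ h1 h2 h3 => pv_rowTouch_far n x y i h1 h2 h3)]
  rw [pv_rowTouch_xm1 n x y hxn hy hyn, pv_rowTouch_x n x y hx hxn hy hyn,
    pv_rowTouch_xp1 n x y hx hy hyn]
  rw [pvF, pvD]
  simp only [show (0 ≤ x ∧ x < n) from ⟨hx, hxn⟩, if_true,
    show (0 ≤ x-1 ∧ x-1 < n) ↔ 1 ≤ x from by omega,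
    show (0 ≤ x+1 ∧ x+1 < n) ↔ x+1 < n from by omega]
  split_ifs <;> simp_all

set_option maxHeartbeats 2000000 in
theorem pv_F_nodup (n x y : Int) : (pvF n x y).Nodup := by
  rw [pvF]
  split_ifs <;> simp_all [Prod.ext_iff] <;> omega

set_option maxHeartbeats 2000000 in
theorem pv_D_sub (n x y : Int) : ∀ z ∈ pvD n x y, z ∈ pvF n x y := by
  intro z hz
  rw [pvD] at hz
  rw [pvF]
  split_ifs at hz ⊢ <;> simp_all [Prod.ext_iff] <;> omega

set_option maxHeartbeats 1000000 in
theorem pv_F_eq_nbrs (n x y : Int) (hx : 0 ≤ x) (hxn : x < n) (hy : 0 ≤ y) (hyn : y < n) :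
    pvF n x y = pvNbrs n x y := by
  rw [pvF, pvNbrs, pvOffsets]
  simp only [List.filter_cons, List.filter_nil, decide_eq_true_eq]
  rw [if_congr (show (0 ≤ x + -1 ∧ x + -1 < n ∧ 0 ≤ y + 0 ∧ y + 0 < n) ↔ 1 ≤ x from by omega) rfl rfl,
    if_congr (show (0 ≤ x + -1 ∧ x + -1 < n ∧ 0 ≤ y + 1 ∧ y + 1 < n) ↔ 1 ≤ x ∧ y + 1 < n from by omega) rfl rfl,
    if_congr (show (0 ≤ x + 0 ∧ x + 0 < n ∧ 0 ≤ y + -1 ∧ y + -1 < n) ↔ 1 ≤ y from by omega) rfl rfl,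
    if_congr (show (0 ≤ x + 1 ∧ x + 1 < n ∧ 0 ≤ y + 0 ∧ y + 0 < n) ↔ x + 1 < n from by omega) rfl rfl,
    if_congr (show (0 ≤ x + 1 ∧ x + 1 < n ∧ 0 ≤ y + -1 ∧ y + -1 < n) ↔ x + 1 < n ∧ 1 ≤ y from by omega) rfl rfl,
    if_congr (show (0 ≤ x + 0 ∧ x + 0 < n ∧ 0 ≤ y + 1 ∧ y + 1 < n) ↔ y + 1 < n from by omega) rfl rfl]
  split_ifs <;> (try (exfalso; omega)) <;> simp <;> try omega

theorem pv_value (n x y : Int) (hx : 0 ≤ x) (hxn : x < n) (hy : 0 ≤ y) (hyn : y < n) :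
    List.foldl PySem.Set.add []
      ((pvGrid n).flatMap (fun c => pvTouch n c.1 c.2 x y)) = pvNbrs n x y := by
  rw [pv_bigTouch n x y hx hxn hy hyn,
    pv_set_fold (pvF n x y) (pvD n x y) (pv_F_nodup n x y) (pv_D_sub n x y)]
  exact pv_F_eq_nbrs n x y hx hxn hy hyn

theorem pv_opsAt_src (n : Int) (c : Int × Int) (hc : c ∈ pvGrid n) :
    ∀ p ∈ pvOpsAt n c.1 c.2, p.1 ∈ pvGrid n := by
  obtain ⟨i, j⟩ := c
  have hb : 0 ≤ i ∧ i < n ∧ 0 ≤ j ∧ j < n := (pv_mem_grid n (i, j)).mp hc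
  intro p hp
  rw [pv_mem_grid]
  simp only [pvOpsAt, List.mem_append, List.mem_ite_nil_right, List.mem_cons,
    List.not_mem_nil, or_false] at hp
  rcases hp with ((⟨hg, ((h|h)|⟨hg2, (h|h)⟩)⟩ | ⟨hg, (h|h)⟩) | ⟨hg, (h|h)⟩) | ⟨hg, (h|h)⟩ <;>
    (rw [h]; simp; omega)

theorem pv_foldB (n : Int) :
    (PySem.List.pyRange 0 n 1).foldl (fun d i =>
      (PySem.List.pyRange 0 n 1).foldl (fun d j => d.insert (i, j) (pvNbrs n i j)) d)
      (PySem.Dict.empty (κ := Int × Int) (ν := List (Int × Int)))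
    = (pvGrid n).foldl (fun d p => d.insert p (pvNbrs n p.1 p.2)) PySem.Dict.empty := by
  rw [pvGrid, pv_foldl_flatMap]
  simp [List.foldl_map]

theorem pv_foldInit (n : Int) :
    (PySem.List.pyRange 0 n 1).foldl (fun d i =>
      (PySem.List.pyRange 0 n 1).foldl (fun d j => d.insert (i, j) ([] : List (Int × Int))) d)
      PySem.Dict.empty
    = (pvGrid n).foldl (fun d p => d.insert p ([] : List (Int × Int))) PySem.Dict.empty := by
  rw [pvGrid, pv_foldl_flatMap]
  simp [List.foldl_map]

theorem pv_foldPhase2 (n : Int) (d0 : PySem.Dict (Int × Int) (List (Int × Int))) :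
    (PySem.List.pyRange 0 n 1).foldl (fun d i =>
      (PySem.List.pyRange 0 n 1).foldl (fun d j => pvBodyA n d i j) d) d0
    = (pvGrid n).foldl (fun d c => pvBodyA n d c.1 c.2) d0 := by
  rw [pvGrid, pv_foldl_flatMap]
  simp [List.foldl_map]

theorem pv_dictB_items (n : Int) :
    ((PySem.List.pyRange 0 n 1).foldl (fun d i =>
      (PySem.List.pyRange 0 n 1).foldl (fun d j => d.insert (i, j) (pvNbrs n i j)) d)
      (PySem.Dict.empty (κ := Int × Int) (ν := List (Int × Int)))).items
    = (pvGrid n).map (fun q => (q, pvNbrs n q.1 q.2)) := by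
  rw [pv_foldB n]
  rw [PySem.Dict.items_foldl_insert_fresh (pvGrid n) (fun a => a)
      (fun a => pvNbrs n a.1 a.2) PySem.Dict.empty
      (fun a _ => PySem.Dict.contains_empty _) (by simpa using pv_grid_nodup n)]
  simp [PySem.Dict.empty]

theorem pv_dictA_items (n : Int) :
    ((PySem.List.pyRange 0 n 1).foldl (fun d i =>
        (PySem.List.pyRange 0 n 1).foldl (fun d j => pvBodyA n d i j) d)
      ((PySem.List.pyRange 0 n 1).foldl (fun d i =>
        (PySem.List.pyRange 0 n 1).foldl (fun d j => d.insert (i, j) ([] : List (Int × Int))) d)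
        PySem.Dict.empty)).items
    = (pvGrid n).map (fun q => (q, pvNbrs n q.1 q.2)) := by
  rw [pv_foldPhase2 n, pv_foldInit n]
  set init := (pvGrid n).foldl (fun d p => d.insert p ([] : List (Int × Int))) PySem.Dict.empty
    with hinit
  have hinit_items : init.items = (pvGrid n).map (fun q => (q, ([] : List (Int × Int)))) := by
    rw [hinit]
    rw [PySem.Dict.items_foldl_insert_fresh (pvGrid n) (fun a => a)
        (fun _ => ([] : List (Int × Int))) PySem.Dict.empty
        (fun a _ => PySem.Dict.contains_empty _) (by simpa using pv_grid_nodup n)]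
    rfl
  have hinit_keys : init.keys = pvGrid n := by
    show init.items.map Prod.fst = pvGrid n
    rw [hinit_items, List.map_map]
    have hcomp : Prod.fst ∘ (fun q : Int × Int => (q, ([] : List (Int × Int)))) = id := rfl
    rw [hcomp, List.map_id]
  have hinit_nodup : init.keys.Nodup := by rw [hinit_keys]; exact pv_grid_nodup n
  have hinit_contains : ∀ c ∈ pvGrid n, init.contains c = true := by
    intro c hc
    rw [PySem.Dict.contains_iff_mem_keys, hinit_keys]
    exact hc
  have hinit_getD : ∀ q ∈ pvGrid n, init.getD q [] = [] := by
    intro q hq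
    exact PySem.Dict.getD_of_mem_items init
      (by rw [hinit_items]; exact List.mem_map_of_mem hq) hinit_nodup []
  -- body fold as one ops fold
  have hbody : (pvGrid n).foldl (fun d c => pvBodyA n d c.1 c.2) init
      = ((pvGrid n).flatMap (fun c => pvOpsAt n c.1 c.2)).foldl
          (fun d p => pvConnect d p.1 p.2) init := by
    rw [pv_foldl_flatMap]
    have he : (fun (d : PySem.Dict (Int × Int) (List (Int × Int))) (c : Int × Int) =>
        pvBodyA n d c.1 c.2)
        = fun d c => (pvOpsAt n c.1 c.2).foldl (fun d p => pvConnect d p.1 p.2) d := by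
      funext d c
      exact pv_bodyA_eq n d c.1 c.2
    rw [he]
  rw [hbody]
  have hsrc : ∀ p ∈ (pvGrid n).flatMap (fun c => pvOpsAt n c.1 c.2),
      init.contains p.1 = true := by
    intro p hp
    rw [List.mem_flatMap] at hp
    obtain ⟨c, hc, hpc⟩ := hp
    exact hinit_contains _ (pv_opsAt_src n c hc p hpc)
  obtain ⟨hkeys, hgetD⟩ := pv_conn_foldl _ init hsrc
  have hfin_keys : (((pvGrid n).flatMap (fun c => pvOpsAt n c.1 c.2)).foldl
      (fun d p => pvConnect d p.1 p.2) init).keys = pvGrid n := by rw [hkeys, hinit_keys]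
  rw [PySem.Dict.items_eq_map_keys _ (by rw [hfin_keys]; exact pv_grid_nodup n) []]
  rw [hfin_keys]
  apply List.map_congr_left
  intro q hq
  obtain ⟨x, y⟩ := q
  have hb : 0 ≤ x ∧ x < n ∧ 0 ≤ y ∧ y < n := (pv_mem_grid n (x, y)).mp hq
  have hv := hgetD (x, y)
  rw [hinit_getD (x, y) hq] at hv
  rw [hv]
  have hfm : ((((pvGrid n).flatMap (fun c => pvOpsAt n c.1 c.2)).filter
      (fun p => p.1 == (x, y))).map (fun p => p.2))
      = (pvGrid n).flatMap (fun c => pvTouch n c.1 c.2 x y) := by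
    rw [List.filter_flatMap, List.map_flatMap]
    rfl
  rw [hfm]
  rw [pv_value n x y hb.1 hb.2.1 hb.2.2.1 hb.2.2.2]

-- ===== VERDICT (by name: the statement is the Claim_ definition above) =====
theorem build_hex_adjacency_spec : Claim_equal_build_hex_adjacency := by
  unfold Claim_equal_build_hex_adjacency
  intro n _
  unfold Spec_build_hex_adjacency build_hex_adjacency build_hex_adjacency_alt
  simp only [pv_dictA_items n, pv_dictB_items n]
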